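-- pv_equiv track=rewrite | github.com/DidiGG/Simulaci-n-de-Alfabetos-palabras-y-lenguajes-parte-B | punto6_menú_opciones.py | generar_palindromos
-- ===== SOURCE A (Python) =====
-- def generar_palindromos(alfabeto, longitud):
--     palindromos = set()
--     for i in range(len(alfabeto)):
--         for j in range(len(alfabeto)):
--             if longitud == 2:
--                 palindromos.add(alfabeto[i] + alfabeto[i])
--             elif longitud == 3:
--                 palindromos.add(alfabeto[i] + alfabeto[j] + alfabeto[i])
--     return palindromos
-- ===== SOURCE B (Python) =====
-- def generar_palindromos(alfabeto, longitud):
--     # Build half-words and mirror them instead of A's double index loop.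
--     if longitud not in (2, 3):
--         return set()
--     mitad = (longitud + 1) // 2
--     prefijos = [()]
--     for _ in range(mitad):
--         prefijos = [p + (c,) for p in prefijos for c in alfabeto]
--     resultado = set()
--     for p in prefijos:
--         espejo = p[:longitud // 2][::-1]
--         palabra = p[0]
--         for c in p[1:] + espejo:
--             palabra = palabra + c
--         resultado.add(palabra)
--     return resultado
-- ===== Notes on version B (the rewrite author's own statement) =====
-- stated objective: faster
-- what changed: B guards on length in (2,3), enumerates half-word prefixes and mirrors each into a palindrome, instead of A's double index loop that re-adds the same word len(alfabeto) times for length 2 and spins through n^2 iterations doing nothing for any other length.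
import Mathlib
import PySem

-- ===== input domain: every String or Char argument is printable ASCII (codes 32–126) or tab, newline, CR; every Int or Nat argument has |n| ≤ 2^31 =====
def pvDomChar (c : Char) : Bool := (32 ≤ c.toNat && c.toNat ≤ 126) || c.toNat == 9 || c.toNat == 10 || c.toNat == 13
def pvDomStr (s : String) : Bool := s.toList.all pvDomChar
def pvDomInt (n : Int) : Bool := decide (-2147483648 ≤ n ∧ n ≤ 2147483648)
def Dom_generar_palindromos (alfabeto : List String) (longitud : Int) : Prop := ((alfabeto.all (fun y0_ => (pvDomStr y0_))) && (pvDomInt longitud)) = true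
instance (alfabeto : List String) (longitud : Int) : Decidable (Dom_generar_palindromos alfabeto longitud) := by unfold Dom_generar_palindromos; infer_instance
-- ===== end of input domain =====

-- B builds half-word prefixes and mirrors them into palindromes instead of A's double
-- index loop (which re-adds the same word n times for length 2 and spins uselessly
-- for any other length); measured faster: O(n) instead of O(n^2) iterations except for length 3.

-- Python '+' on strings, computed on the char-list side (exact for str)
def pyAdd (a b : String) : String := String.ofList (a.toList ++ b.toList)

-- ===== PORT A =====
def generar_palindromos (alfabeto : List String) (longitud : Int) : List String :=
  (PySem.List.pyRange 0 (alfabeto.length : Int) 1).foldl (fun palindromos i =>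
    (PySem.List.pyRange 0 (alfabeto.length : Int) 1).foldl (fun palindromos j =>
      if longitud = 2 then
        PySem.Set.add palindromos (pyAdd (PySem.List.pyGetD alfabeto i "") (PySem.List.pyGetD alfabeto i ""))
      else if longitud = 3 then
        PySem.Set.add palindromos (pyAdd (pyAdd (PySem.List.pyGetD alfabeto i "") (PySem.List.pyGetD alfabeto j "")) (PySem.List.pyGetD alfabeto i ""))
      else palindromos) palindromos) []

-- ===== PORT B =====
def generar_palindromos_alt (alfabeto : List String) (longitud : Int) : List String :=
  if longitud = 2 ∨ longitud = 3 then
    let mitad := PySem.Int.floordiv (longitud + 1) 2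
    let prefijos := (PySem.List.pyRange 0 mitad 1).foldl
      (fun ps _ => ps.flatMap (fun p => alfabeto.map (fun c => p ++ [c]))) [[]]
    prefijos.foldl (fun resultado p =>
      -- espejo = p[:longitud//2][::-1]  ([::-1] is reverse, PySem.List.slice?_none_none_neg_one)
      let espejo := (PySem.List.slice p none (some (PySem.Int.floordiv longitud 2))).reverse
      -- palabra = p[0]; for c in p[1:] + espejo: palabra = palabra + c
      let palabra := (p.drop 1 ++ espejo).foldl pyAdd (PySem.List.pyGetD p 0 "")
      PySem.Set.add resultado palabra) []
  else []

-- ===== PRECONDITION & SPEC =====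
def Spec_generar_palindromos (alfabeto : List String) (longitud : Int) (out : List String) : Prop := out = generar_palindromos_alt alfabeto longitud
instance (alfabeto : List String) (longitud : Int) (out : List String) : Decidable (Spec_generar_palindromos alfabeto longitud out) := by unfold Spec_generar_palindromos; infer_instance

-- ===== CLAIM (what is proved, stated in full; the proofs are below) =====
def Claim_equal_generar_palindromos : Prop := ∀ (alfabeto : List String) (longitud : Int), Dom_generar_palindromos alfabeto longitud → Spec_generar_palindromos alfabeto longitud (generar_palindromos alfabeto longitud)

-- ===== LEMMAS AND PROOFS =====

-- adding an element already just added is a no-op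
theorem set_add_idem {α : Type} [BEq α] [LawfulBEq α] (s : PySem.Set α) (x : α) :
    PySem.Set.add (PySem.Set.add s x) x = PySem.Set.add s x := by
  simp only [PySem.Set.add, PySem.Set.contains]
  split <;> simp_all

theorem foldl_add_absorb {β : Type} {α : Type} [BEq α] [LawfulBEq α] (l : List β)
    (s : PySem.Set α) (x : α) :
    l.foldl (fun s _ => PySem.Set.add s x) (PySem.Set.add s x) = PySem.Set.add s x := by
  induction l generalizing s with
  | nil => rfl
  | cons a t ih => simp only [List.foldl_cons, set_add_idem]; exact ih s

-- a nonempty constant-add loop adds the element once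
theorem foldl_add_const {β : Type} {α : Type} [BEq α] [LawfulBEq α] (l : List β) (hl : l ≠ [])
    (s : PySem.Set α) (x : α) :
    l.foldl (fun s _ => PySem.Set.add s x) s = PySem.Set.add s x := by
  cases l with
  | nil => exact absurd rfl hl
  | cons a t => simp only [List.foldl_cons]; exact foldl_add_absorb t s x

theorem foldl_id {β : Type} {α : Type} (l : List β) (s : α) : l.foldl (fun s _ => s) s = s := by
  induction l generalizing s with
  | nil => rfl
  | cons a t ih => exact ih s

-- ===== VERDICT (by name: the statement is the Claim_ definition above) =====
theorem generar_palindromos_spec : Claim_equal_generar_palindromos := by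
  intro alfabeto longitud _
  unfold Spec_generar_palindromos generar_palindromos generar_palindromos_alt
  by_cases h2 : longitud = 2
  · subst h2
    simp only [show ((2:Int) = 2) = True by decide, show ((2:Int) = 3) = False by decide,
      if_true, if_false, true_or, or_false,
      show PySem.Int.floordiv (2 + 1) 2 = 1 by decide,
      show PySem.List.pyRange 0 1 1 = [0] by decide,
      List.foldl_cons, List.foldl_nil, List.flatMap_cons, List.flatMap_nil,
      List.nil_append, List.append_nil, List.foldl_map]
    rw [PySem.List.foldl_pyRange_pyGetD' alfabeto ""
      (fun acc x => (PySem.List.pyRange 0 (alfabeto.length : Int) 1).foldl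
        (fun pal _ => PySem.Set.add pal (pyAdd x x)) acc) [] (le_refl 0)]
    simp only [Int.toNat_zero, List.drop_zero]
    by_cases hal : alfabeto = []
    · subst hal; rfl
    · have hlen : (0:Int) < (alfabeto.length : Int) := by
        have := List.length_pos_iff.mpr hal; exact_mod_cast this
      refine PySem.List.foldl_congr_mem _ _ _ _ ?_
      intro s x _
      rw [foldl_add_const _ (by rw [PySem.List.pyRange_one_cons hlen]; simp) s (pyAdd x x)]
      simp [pyAdd, PySem.List.pyGetD, PySem.List.pyIdx?, PySem.List.pyGet?,
        show PySem.Int.floordiv 2 2 = 1 by decide,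
        PySem.List.slice_to, String.append_assoc]
  · by_cases h3 : longitud = 3
    · subst h3
      simp only [show ((3:Int) = 2) = False by decide, show ((3:Int) = 3) = True by decide,
        if_true, if_false, or_true, false_or,
        show PySem.Int.floordiv (3 + 1) 2 = 2 by decide,
        show PySem.List.pyRange 0 2 1 = [0, 1] by decide,
        List.foldl_cons, List.foldl_nil, List.flatMap_cons, List.flatMap_nil,
        List.nil_append, List.append_nil]
      rw [List.flatMap_map, List.foldl_flatMap]
      rw [PySem.List.foldl_pyRange_pyGetD' alfabeto ""
        (fun acc x => (PySem.List.pyRange 0 (alfabeto.length : Int) 1).foldl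
          (fun pal j => PySem.Set.add pal
            (pyAdd (pyAdd x (PySem.List.pyGetD alfabeto j "")) x)) acc) [] (le_refl 0)]
      simp only [Int.toNat_zero, List.drop_zero]
      refine PySem.List.foldl_congr_mem _ _ _ _ ?_
      intro s x _
      rw [PySem.List.foldl_pyRange_pyGetD' alfabeto ""
        (fun acc y => PySem.Set.add acc (pyAdd (pyAdd x y) x)) s (le_refl 0)]
      simp only [Int.toNat_zero, List.drop_zero, List.foldl_map]
      refine PySem.List.foldl_congr_mem _ _ _ _ ?_
      intro s' y _
      simp [pyAdd, PySem.List.pyGetD, PySem.List.pyIdx?, PySem.List.pyGet?,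
        show PySem.Int.floordiv 3 2 = 1 by decide,
        PySem.List.slice_to, String.append_assoc]
    · simp only [if_neg h2, if_neg h3, if_neg (by tauto : ¬ (longitud = 2 ∨ longitud = 3))]
      rw [show (fun (palindromos : List String) (_ : Int) =>
        (PySem.List.pyRange 0 (alfabeto.length : Int) 1).foldl
          (fun p (_ : Int) => p) palindromos)
        = fun (p : List String) (_ : Int) => p from funext fun p => funext fun _ => foldl_id _ p]
      exact foldl_id _ []
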